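-- pv_equiv track=rewrite | github.com/djglxxii/PacMan-V8 | PacManV8/tools/input_tests.py | button_byte
-- ===== SOURCE A (Python) =====
-- BUTTON_MASKS = {"up": 0x80, "down": 0x40, "left": 0x20, "right": 0x10}
--
-- def button_byte(buttons: list[str]) -> int:
--     """Return active-low controller byte with given buttons pressed."""
--     state = 0xFF
--     for btn in buttons:
--         if btn in BUTTON_MASKS:
--             state &= ~BUTTON_MASKS[btn]
--         elif btn == "start":
--             state &= ~0x01
--     return state
-- ===== SOURCE B (Python) =====
-- def button_byte(buttons: list[str]) -> int:
--     """Return active-low controller byte with given buttons pressed."""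
--     pressed = set(buttons)
--     return (255
--             - 0x80 * ("up" in pressed)
--             - 0x40 * ("down" in pressed)
--             - 0x20 * ("left" in pressed)
--             - 0x10 * ("right" in pressed)
--             - 0x01 * ("start" in pressed))
-- ===== Notes on version B (the rewrite author's own statement) =====
-- stated objective: simpler
-- what changed: B replaces A's per-element loop with bitwise masking by a loop-free closed form: it builds set(buttons) once and returns 255 minus the sum of the five disjoint masks whose button is pressed, using arithmetic instead of AND/NOT and folding the special-cased "start" into the same form.
import Mathlib
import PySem

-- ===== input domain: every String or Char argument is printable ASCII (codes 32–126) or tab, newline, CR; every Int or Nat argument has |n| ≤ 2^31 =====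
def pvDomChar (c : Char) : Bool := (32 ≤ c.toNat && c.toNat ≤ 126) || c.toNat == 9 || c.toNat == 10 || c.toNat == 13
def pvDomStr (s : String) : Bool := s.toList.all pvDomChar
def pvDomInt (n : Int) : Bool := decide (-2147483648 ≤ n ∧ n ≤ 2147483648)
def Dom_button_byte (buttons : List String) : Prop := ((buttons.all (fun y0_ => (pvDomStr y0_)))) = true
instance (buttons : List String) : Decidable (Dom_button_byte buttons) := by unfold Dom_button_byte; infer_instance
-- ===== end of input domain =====

-- B replaces A's masking loop by a loop-free closed form: 255 minus the sum of the
-- disjoint masks of the distinct pressed buttons (simpler; same cost).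

-- ===== PORT A =====
def BUTTON_MASKS : PySem.Dict String Int :=
  PySem.Dict.ofList [("up", 0x80), ("down", 0x40), ("left", 0x20), ("right", 0x10)]

-- Python '~m' on an int is exactly '-m - 1'.
def button_byte (buttons : List String) : Int :=
  buttons.foldl (fun state btn =>
    match BUTTON_MASKS.get? btn with
    | some m => PySem.Int.band state (-m - 1)
    | none => if btn == "start" then PySem.Int.band state (-0x01 - 1) else state) 0xFF

-- ===== PORT B =====
-- Python's 'mask * (name in pressed)' (bool as 0/1) is ported as 'if … then mask else 0'.
def button_byte_alt (buttons : List String) : Int :=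
  let pressed := PySem.Set.ofList buttons
  255
    - (if PySem.Set.contains pressed "up" then 0x80 else 0)
    - (if PySem.Set.contains pressed "down" then 0x40 else 0)
    - (if PySem.Set.contains pressed "left" then 0x20 else 0)
    - (if PySem.Set.contains pressed "right" then 0x10 else 0)
    - (if PySem.Set.contains pressed "start" then 0x01 else 0)

-- ===== PRECONDITION & SPEC =====
def Spec_button_byte (buttons : List String) (out : Int) : Prop := out = button_byte_alt buttons
instance (buttons : List String) (out : Int) : Decidable (Spec_button_byte buttons out) := by unfold Spec_button_byte; infer_instance

-- ===== CLAIM (what is proved, stated in full; the proofs are below) =====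
def Claim_equal_button_byte : Prop := ∀ (buttons : List String), Dom_button_byte buttons → Spec_button_byte buttons (button_byte buttons)

-- ===== LEMMAS AND PROOFS =====

/-- A's loop body, named for the proofs (definitionally the lambda in `button_byte`). -/
def pvStepA (state : Int) (btn : String) : Int :=
  match BUTTON_MASKS.get? btn with
  | some m => PySem.Int.band state (-m - 1)
  | none => if btn == "start" then PySem.Int.band state (-0x01 - 1) else state

theorem pvA_as_foldl (buttons : List String) :
    button_byte buttons = buttons.foldl pvStepA 0xFF := rfl

/-- The active-low byte as a function of which of the five buttons are pressed. -/
def pvEnc (u d l r s : Bool) : Int :=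
  255 - (cond u 128 0) - (cond d 64 0) - (cond l 32 0) - (cond r 16 0) - (cond s 1 0)

theorem pvStep_up : ∀ u d l r s, pvStepA (pvEnc u d l r s) "up" = pvEnc true d l r s := by decide
theorem pvStep_down : ∀ u d l r s, pvStepA (pvEnc u d l r s) "down" = pvEnc u true l r s := by decide
theorem pvStep_left : ∀ u d l r s, pvStepA (pvEnc u d l r s) "left" = pvEnc u d true r s := by decide
theorem pvStep_right : ∀ u d l r s, pvStepA (pvEnc u d l r s) "right" = pvEnc u d l true s := by decide
theorem pvStep_start : ∀ u d l r s, pvStepA (pvEnc u d l r s) "start" = pvEnc u d l r true := by decide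

theorem pvStep_other (state : Int) (btn : String) (hu : btn ≠ "up") (hd : btn ≠ "down")
    (hl : btn ≠ "left") (hr : btn ≠ "right") (hs : btn ≠ "start") :
    pvStepA state btn = state := by
  have hnone : BUTTON_MASKS.get? btn = none := by
    simp [BUTTON_MASKS, PySem.Dict.get?]
    intro a b hab
    rw [show (PySem.Dict.ofList [("up", (128:Int)), ("down", 64), ("left", 32), ("right", 16)]).items
        = [("up", (128:Int)), ("down", 64), ("left", 32), ("right", 16)] from rfl] at hab
    simp at hab
    rcases hab with ⟨ha, _⟩ | ⟨ha, _⟩ | ⟨ha, _⟩ | ⟨ha, _⟩ <;> subst ha <;>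
      first
      | exact fun hh => hu hh.symm
      | exact fun hh => hd hh.symm
      | exact fun hh => hl hh.symm
      | exact fun hh => hr hh.symm
  unfold pvStepA
  rw [hnone]
  simp [hs]

theorem pvA_loop (buttons : List String) : ∀ u d l r s : Bool,
    buttons.foldl pvStepA (pvEnc u d l r s)
    = pvEnc (u || decide ("up" ∈ buttons)) (d || decide ("down" ∈ buttons))
        (l || decide ("left" ∈ buttons)) (r || decide ("right" ∈ buttons)) (s || decide ("start" ∈ buttons)) := by
  induction buttons with
  | nil => simp
  | cons btn rest ih =>
    intro u d l r s
    by_cases hu : btn = "up"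
    · subst hu
      rw [List.foldl_cons, pvStep_up, ih]
      simp [List.mem_cons]
    · by_cases hd : btn = "down"
      · subst hd
        rw [List.foldl_cons, pvStep_down, ih]
        simp [List.mem_cons]
      · by_cases hl : btn = "left"
        · subst hl
          rw [List.foldl_cons, pvStep_left, ih]
          simp [List.mem_cons]
        · by_cases hr : btn = "right"
          · subst hr
            rw [List.foldl_cons, pvStep_right, ih]
            simp [List.mem_cons]
          · by_cases hs : btn = "start"
            · subst hs
              rw [List.foldl_cons, pvStep_start, ih]
              simp [List.mem_cons]
            · rw [List.foldl_cons, pvStep_other _ btn hu hd hl hr hs, ih]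
              simp [List.mem_cons, Ne.symm hu, Ne.symm hd, Ne.symm hl, Ne.symm hr, Ne.symm hs]

theorem pvB_eval (buttons : List String) :
    button_byte_alt buttons
    = pvEnc (decide ("up" ∈ buttons)) (decide ("down" ∈ buttons)) (decide ("left" ∈ buttons))
        (decide ("right" ∈ buttons)) (decide ("start" ∈ buttons)) := by
  have hc : ∀ x : String, PySem.Set.contains (PySem.Set.ofList buttons) x = decide (x ∈ buttons) := by
    intro x
    by_cases h : x ∈ buttons <;> simp [h, PySem.Set.mem_ofList]
  unfold button_byte_alt pvEnc
  simp only [hc]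
  by_cases h1 : "up" ∈ buttons <;> by_cases h2 : "down" ∈ buttons <;>
    by_cases h3 : "left" ∈ buttons <;> by_cases h4 : "right" ∈ buttons <;>
    by_cases h5 : "start" ∈ buttons <;>
    simp only [h1, h2, h3, h4, h5, decide_true, decide_false, cond_true, cond_false] <;> norm_num

-- ===== VERDICT (by name: the statement is the Claim_ definition above) =====
theorem button_byte_spec : Claim_equal_button_byte := by
  intro buttons _
  unfold Spec_button_byte
  rw [pvB_eval, pvA_as_foldl]
  have := pvA_loop buttons false false false false false
  simpa using this
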